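-- pv_equiv track=rewrite | github.com/m-hahn/infolocality | pmonad_experiments.py | move_matrix_aux
-- ===== SOURCE A (Python) =====
-- def move_matrix_aux(terminals):
--     def gen():
--         embedded = False
--         found_aux = False
--         so_far = []
--         for terminal in terminals:
--             if not found_aux and not embedded and terminal.startswith("Aux"):
--                 found_aux = True
--                 yield terminal
--                 yield from so_far
--             elif not found_aux and embedded and terminal.startswith("Aux"): # only one level of embedding possible under the grammar
--                 embedded = False
--                 so_far.append(terminal)
--             elif not found_aux and terminal.startswith("C"):
--                 embedded = True
--                 so_far.append(terminal)
--             elif not found_aux: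
--                 so_far.append(terminal)
--             else:
--                 yield terminal
--     return tuple(gen())
-- ===== SOURCE B (Python) =====
-- def move_matrix_aux(terminals):
--     ts = list(terminals)
--     # phase 1: locate the pivot, the first Aux terminal that is not embedded
--     pivot = None
--     embedded = False
--     for i, t in enumerate(ts):
--         if t.startswith("Aux"):
--             if not embedded:
--                 pivot = (i, t)
--                 break
--             embedded = False
--         elif t.startswith("C"):
--             embedded = True
--     # phase 2: splice; with no pivot A's generator yields nothing, so ()
--     if pivot is None:
--         return ()
--     i, t = pivot
--     return (t,) + tuple(ts[:i]) + tuple(ts[i+1:])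
-- ===== Notes on version B (the rewrite author's own statement) =====
-- stated objective: simpler
-- what changed: Replaces the stateful accumulate-and-yield generator with a locate-pivot-then-splice decomposition: a first scan finds the index of the first non-embedded Aux terminal, then the result is built by slice concatenation (pivot + prefix + suffix); no so_far accumulator and no generator.
import Mathlib
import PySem

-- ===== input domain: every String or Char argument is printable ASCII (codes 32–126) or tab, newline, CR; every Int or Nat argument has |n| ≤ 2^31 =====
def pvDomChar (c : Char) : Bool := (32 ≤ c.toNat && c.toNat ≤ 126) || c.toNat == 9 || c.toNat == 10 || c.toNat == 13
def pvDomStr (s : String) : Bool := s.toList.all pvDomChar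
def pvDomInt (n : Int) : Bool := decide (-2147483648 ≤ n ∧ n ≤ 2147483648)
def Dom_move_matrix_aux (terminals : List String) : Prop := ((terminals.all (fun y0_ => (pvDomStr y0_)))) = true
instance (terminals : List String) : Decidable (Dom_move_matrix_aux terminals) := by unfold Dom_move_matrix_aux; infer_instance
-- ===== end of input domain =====

-- B replaces A's accumulate-and-yield generator by locate-pivot-then-splice (objective: simpler); return value identical.

-- ===== PORT A =====
-- state: (embedded, found_aux, so_far, yielded output)
def pvStepA (s : Bool × Bool × List String × List String) (terminal : String) :
    Bool × Bool × List String × List String :=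
  let (embedded, found_aux, so_far, out) := s
  if !found_aux && !embedded && PySem.Str.startswith terminal "Aux" then
    (embedded, true, so_far, out ++ [terminal] ++ so_far)
  else if !found_aux && embedded && PySem.Str.startswith terminal "Aux" then
    (false, found_aux, so_far ++ [terminal], out)
  else if !found_aux && PySem.Str.startswith terminal "C" then
    (true, found_aux, so_far ++ [terminal], out)
  else if !found_aux then
    (embedded, found_aux, so_far ++ [terminal], out)
  else
    (embedded, found_aux, so_far, out ++ [terminal])

def move_matrix_aux (terminals : List String) : List String :=
  (terminals.foldl pvStepA (false, false, [], [])).2.2.2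

-- ===== PORT B =====
-- phase 1 of Source B: the enumerate loop with the `embedded` flag; returns (index, terminal) of the pivot
def pvFindPivot : List String → Bool → Option (Nat × String)
  | [], _ => none
  | t :: rest, embedded =>
    if PySem.Str.startswith t "Aux" then
      if !embedded then some (0, t)
      else (pvFindPivot rest false).map (fun p => (p.1 + 1, p.2))
    else if PySem.Str.startswith t "C" then
      (pvFindPivot rest true).map (fun p => (p.1 + 1, p.2))
    else
      (pvFindPivot rest embedded).map (fun p => (p.1 + 1, p.2))

def move_matrix_aux_alt (terminals : List String) : List String :=
  match pvFindPivot terminals false with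
  | none => []
  | some (i, t) => t :: terminals.take i ++ terminals.drop (i + 1)

-- ===== PRECONDITION & SPEC =====
def Spec_move_matrix_aux (terminals : List String) (out : List String) : Prop := out = move_matrix_aux_alt terminals
instance (terminals : List String) (out : List String) : Decidable (Spec_move_matrix_aux terminals out) := by unfold Spec_move_matrix_aux; infer_instance

-- ===== CLAIM (what is proved, stated in full; the proofs are below) =====
def Claim_equal_move_matrix_aux : Prop := ∀ (terminals : List String), Dom_move_matrix_aux terminals → Spec_move_matrix_aux terminals (move_matrix_aux terminals)

-- ===== LEMMAS AND PROOFS =====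

-- once found_aux is set, A only appends each remaining terminal to the output
theorem pvFoldA_found (ts : List String) (e : Bool) (sf out : List String) :
    ts.foldl pvStepA (e, true, sf, out) = (e, true, sf, out ++ ts) := by
  induction ts generalizing out with
  | nil => simp
  | cons t rest ih => simp [pvStepA, ih]

-- the main invariant: before the pivot, A's so_far is exactly the processed prefix
theorem pvFoldA_main (ts : List String) (e : Bool) (p : List String) :
    (ts.foldl pvStepA (e, false, p, [])).2.2.2 =
      (match pvFindPivot ts e with
       | none => []
       | some (i, t) => t :: (p ++ ts.take i) ++ ts.drop (i + 1)) := by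
  induction ts generalizing e p with
  | nil => simp [pvFindPivot]
  | cons t rest ih =>
    by_cases hA : PySem.Str.startswith t "Aux" = true
    · cases e with
      | false =>
        simp only [List.foldl, pvStepA, pvFindPivot, hA, Bool.not_true, Bool.not_false,
          Bool.false_and, Bool.true_and, Bool.and_false, Bool.and_true, Bool.false_eq_true,
          if_false, if_true]
        rw [pvFoldA_found]
        simp
      | true =>
        simp only [List.foldl, pvStepA, pvFindPivot, hA, Bool.not_true, Bool.not_false,
          Bool.false_and, Bool.true_and, Bool.and_false, Bool.and_true, Bool.false_eq_true,
          if_false, if_true]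
        rw [ih]
        cases hfp : pvFindPivot rest false with
        | none => simp
        | some pr => cases pr with
          | mk i t' => simp [List.take_succ_cons, List.drop_succ_cons]
    · by_cases hC : PySem.Str.startswith t "C" = true
      · simp only [List.foldl, pvStepA, pvFindPivot, hA, hC, Bool.not_true, Bool.not_false,
          Bool.false_and, Bool.true_and, Bool.and_false, Bool.and_true, Bool.false_eq_true,
          if_false, if_true]
        rw [ih]
        cases hfp : pvFindPivot rest true with
        | none => simp
        | some pr => cases pr with
          | mk i t' => simp [List.take_succ_cons, List.drop_succ_cons]
      · simp only [List.foldl, pvStepA, pvFindPivot, hA, hC, Bool.not_true, Bool.not_false,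
          Bool.false_and, Bool.true_and, Bool.and_false, Bool.and_true, Bool.false_eq_true,
          if_false, if_true]
        rw [ih]
        cases hfp : pvFindPivot rest e with
        | none => simp
        | some pr => cases pr with
          | mk i t' => simp [List.take_succ_cons, List.drop_succ_cons]

-- ===== VERDICT (by name: the statement is the Claim_ definition above) =====
theorem move_matrix_aux_spec : Claim_equal_move_matrix_aux := by
  intro terminals _
  unfold Spec_move_matrix_aux move_matrix_aux move_matrix_aux_alt
  rw [pvFoldA_main]
  cases h : pvFindPivot terminals false with
  | none => simp
  | some pr => cases pr; simp
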